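-- pv_equiv track=rewrite | github.com/sjyjytu/elevator_clean2 | smec_liftsim/utils.py | change_list_to_qtype_floor
-- ===== SOURCE A (Python) =====
-- def change_list_to_qtype_floor(call, flrnum):
--     qtype = []
--     for flr in range(flrnum):
--         if flr in call:
--             qtype.append(1)
--         else:
--             qtype.append(0)
--
--     return qtype
-- ===== SOURCE B (Python) =====
-- def change_list_to_qtype_floor(call, flrnum):
--     qtype = [0] * flrnum
--     for flr in call:
--         if 0 <= flr < flrnum:
--             qtype[flr] = 1
--     return qtype
-- ===== Notes on version B (the rewrite author's own statement) =====
-- stated objective: faster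
-- what changed: Replaces the gather pass (one membership scan of call per floor) with a preallocated zero list and a single scatter pass over call setting in-range floors to 1.
import Mathlib
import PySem

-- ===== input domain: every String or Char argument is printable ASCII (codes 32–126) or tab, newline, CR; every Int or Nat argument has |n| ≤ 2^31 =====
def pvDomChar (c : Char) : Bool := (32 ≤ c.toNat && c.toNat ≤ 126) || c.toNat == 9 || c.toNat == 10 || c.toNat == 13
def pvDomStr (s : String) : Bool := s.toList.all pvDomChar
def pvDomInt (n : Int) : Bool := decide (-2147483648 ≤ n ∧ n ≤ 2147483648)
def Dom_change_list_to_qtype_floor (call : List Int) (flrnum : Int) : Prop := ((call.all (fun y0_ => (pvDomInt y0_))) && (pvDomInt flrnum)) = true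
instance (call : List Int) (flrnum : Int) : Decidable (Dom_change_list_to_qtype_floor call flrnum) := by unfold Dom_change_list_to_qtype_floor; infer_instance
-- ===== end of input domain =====

-- B replaces A's per-floor membership scan (gather) with a zero-prefilled list and one
-- scatter pass over `call`; measured faster at large sizes (asymptotic: O(n*m) -> O(n+m)).


-- ===== PORT A =====
-- for flr in range(flrnum): append 1 if flr in call else 0
def change_list_to_qtype_floor (call : List Int) (flrnum : Int) : List Int :=
  (PySem.List.pyRange 0 flrnum 1).foldl
    (fun qtype flr => if flr ∈ call then qtype ++ [1] else qtype ++ [0]) []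

-- ===== PORT B =====
-- qtype = [0]*flrnum; for flr in call: if 0 <= flr < flrnum: qtype[flr] = 1
def change_list_to_qtype_floor_alt (call : List Int) (flrnum : Int) : List Int :=
  call.foldl
    (fun qtype flr => if 0 ≤ flr ∧ flr < flrnum then qtype.set flr.toNat 1 else qtype)
    (List.replicate flrnum.toNat 0)

-- ===== PRECONDITION & SPEC =====
def Spec_change_list_to_qtype_floor (call : List Int) (flrnum : Int) (out : List Int) : Prop := out = change_list_to_qtype_floor_alt call flrnum
instance (call : List Int) (flrnum : Int) (out : List Int) : Decidable (Spec_change_list_to_qtype_floor call flrnum out) := by unfold Spec_change_list_to_qtype_floor; infer_instance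

-- ===== CLAIM (what is proved, stated in full; the proofs are below) =====
def Claim_equal_change_list_to_qtype_floor : Prop := ∀ (call : List Int) (flrnum : Int), Dom_change_list_to_qtype_floor call flrnum → Spec_change_list_to_qtype_floor call flrnum (change_list_to_qtype_floor call flrnum)

-- ===== LEMMAS AND PROOFS =====

-- A's append-fold is a map over the range.
theorem pvA_foldl_append (call : List Int) (l : List Int) (acc : List Int) :
    l.foldl (fun qtype flr => if flr ∈ call then qtype ++ [1] else qtype ++ [0]) acc
      = acc ++ l.map (fun flr => if flr ∈ call then (1 : Int) else 0) := by
  induction l generalizing acc with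
  | nil => simp
  | cons x xs ih => simp [List.foldl_cons, ih]; split <;> simp

-- B's scatter fold: length is preserved …
theorem pvB_length (call : List Int) (flrnum : Int) (q : List Int) :
    (call.foldl
      (fun qtype flr => if 0 ≤ flr ∧ flr < flrnum then qtype.set flr.toNat 1 else qtype)
      q).length = q.length := by
  induction call generalizing q with
  | nil => rfl
  | cons x xs ih =>
    simp only [List.foldl_cons]
    rw [ih]; split <;> simp

-- … and each in-bounds entry ends up 1 iff its index is in call (given q has length flrnum).
theorem pvB_get (call : List Int) (flrnum : Int) (q : List Int)
    (hq : q.length = flrnum.toNat) (i : Nat) (hi : i < q.length)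
    (hlen : i < (call.foldl
      (fun qtype flr => if 0 ≤ flr ∧ flr < flrnum then qtype.set flr.toNat 1 else qtype)
      q).length) :
    (call.foldl
      (fun qtype flr => if 0 ≤ flr ∧ flr < flrnum then qtype.set flr.toNat 1 else qtype)
      q)[i] = if (i : Int) ∈ call then 1 else q[i] := by
  induction call generalizing q with
  | nil => simp
  | cons x xs ih =>
    simp only [List.foldl_cons]
    have hlen' : (if 0 ≤ x ∧ x < flrnum then q.set x.toNat 1 else q).length = q.length := by
      split <;> simp
    rw [ih _ (by rw [hlen', hq]) (by rw [hlen']; exact hi)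
        (by rw [pvB_length, hlen']; exact hi)]
    by_cases hx : (i : Int) ∈ xs
    · simp [hx, List.mem_cons]
    · simp only [hx, if_false, List.mem_cons]
      by_cases hxi : x = (i : Int)
      · subst hxi
        have hrange : 0 ≤ (i : Int) ∧ (i : Int) < flrnum := by
          have : i < flrnum.toNat := hq ▸ hi
          omega
        simp [hrange]
      · have heq : (if 0 ≤ x ∧ x < flrnum then q.set x.toNat 1 else q)[i]'(hlen' ▸ hi) = q[i] := by
          split
          · next hr =>
            have hne : x.toNat ≠ i := by omega
            simp [hne]
          · rfl
        rw [heq]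
        have hni : ¬((i : Int) = x) := fun h => hxi h.symm
        simp [hni]

-- ===== VERDICT (by name: the statement is the Claim_ definition above) =====
theorem change_list_to_qtype_floor_spec : Claim_equal_change_list_to_qtype_floor := by
  intro call flrnum _
  unfold Spec_change_list_to_qtype_floor change_list_to_qtype_floor change_list_to_qtype_floor_alt
  rw [pvA_foldl_append]
  apply List.ext_getElem
  · rw [pvB_length]
    simp [PySem.List.length_pyRange_one]
  · intro i h1 h2
    have hi : i < flrnum.toNat := by
      simpa [PySem.List.length_pyRange_one] using h1
    rw [pvB_get call flrnum _ (by simp) i (by simp; omega) h2]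
    simp only [List.nil_append]
    rw [List.getElem_map, PySem.List.getElem_pyRange_one]
    simp
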